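-- pv_equiv track=rewrite | github.com/SoumyaSudhirNayak/statXtract | utils/db_init.py | _to_pg_schema_name
-- ===== SOURCE A (Python) =====
-- def _to_pg_schema_name(display_name: str) -> str:
--     s = (display_name or "").strip().lower()
--     s = s.replace("&", " and ")
--     out = []
--     prev_us = False
--     for ch in s:
--         is_ok = ("a" <= ch <= "z") or ("0" <= ch <= "9")
--         if is_ok:
--             out.append(ch)
--             prev_us = False
--         else:
--             if not prev_us:
--                 out.append("_")
--                 prev_us = True
--     name = "".join(out).strip("_")
--     if not name:
--         return "survey"
--     if name[0].isdigit():
--         name = f"s_{name}"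
--     return name
-- ===== SOURCE B (Python) =====
-- def _to_pg_schema_name(display_name: str) -> str:
--     s = (display_name or "").lower().strip().replace("&", " and ")
--     tokens = []
--     i, n = 0, len(s)
--     while i < n:
--         c = s[i]
--         if "a" <= c <= "z" or "0" <= c <= "9":
--             j = i + 1
--             while j < n:
--                 d = s[j]
--                 if not ("a" <= d <= "z" or "0" <= d <= "9"):
--                     break
--                 j += 1
--             tokens.append(s[i:j])
--             i = j
--         else:
--             i += 1
--     if not tokens:
--         return "survey"
--     name = "_".join(tokens)
--     if "0" <= name[0] <= "9":
--         return "s_" + name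
--     return name
-- ===== Notes on version B (the rewrite author's own statement) =====
-- stated objective: alternative
-- what changed: Replaced A's stateful single-pass accumulator (prev_us flag collapsing runs of '_' plus trailing strip('_')) by a span scan that extracts the maximal alphanumeric runs as a token list and joins them with '_'; preprocessing is reordered (lower before strip) and the digit guard is applied before any underscore bookkeeping exists.
import Mathlib
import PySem

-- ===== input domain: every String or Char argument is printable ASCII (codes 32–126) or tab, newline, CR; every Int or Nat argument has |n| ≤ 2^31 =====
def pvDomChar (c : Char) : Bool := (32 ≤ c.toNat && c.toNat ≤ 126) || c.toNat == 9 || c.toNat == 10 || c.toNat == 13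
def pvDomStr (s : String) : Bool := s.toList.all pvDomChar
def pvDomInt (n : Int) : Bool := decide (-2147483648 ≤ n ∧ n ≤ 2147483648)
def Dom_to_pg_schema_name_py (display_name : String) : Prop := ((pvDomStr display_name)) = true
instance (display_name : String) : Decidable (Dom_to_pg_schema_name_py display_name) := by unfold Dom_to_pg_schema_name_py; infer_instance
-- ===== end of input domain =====

-- B replaces A's stateful accumulator loop (prev_us flag + trailing strip('_')) by a span scan
-- extracting the maximal alphanumeric runs as a token list joined with '_'; objective: alternative.

-- ===== PORT A =====
-- A: strip/lower/replace, then a stateful loop collapsing runs of bad chars into single '_', then strip('_').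
def to_pg_schema_name_py (display_name : String) : String :=
  let s := PySem.Chars.replace (PySem.Chars.lower (PySem.Chars.strip display_name.toList)) ['&'] (" and ".toList)
  let st := s.foldl (fun (acc : List Char × Bool) ch =>
      if (decide ('a' ≤ ch) && decide (ch ≤ 'z')) || (decide ('0' ≤ ch) && decide (ch ≤ '9')) then
        (acc.1 ++ [ch], false)
      else if !acc.2 then (acc.1 ++ ['_'], true) else acc) (([] : List Char), false)
  let name := PySem.Chars.stripChars st.1 ['_']
  match name with
  | [] => "survey"
  | c :: _ => if PySem.Chars.isdigit c then String.ofList ('s' :: '_' :: name) else String.ofList name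

-- ===== PORT B =====
-- Source B's alphanumeric test
def altOk (c : Char) : Bool := (decide ('a' ≤ c) && decide (c ≤ 'z')) || (decide ('0' ≤ c) && decide (c ≤ '9'))

-- Source B's index scan: each maximal altOk-run s[i:j] is a takeWhile, the loop resumes at the dropWhile rest
def altTokens : List Char → List (List Char)
  | [] => []
  | c :: r => if altOk c then (c :: r.takeWhile altOk) :: altTokens (r.dropWhile altOk) else altTokens r
termination_by t => t.length
decreasing_by
  · simp only [List.length_cons]
    have := List.length_dropWhile_le altOk r
    omega
  · simp

-- B: lower/strip/replace, extract the token list, then join with '_' and guard empty/digit-first.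
def to_pg_schema_name_py_alt (display_name : String) : String :=
  let s := PySem.Chars.replace (PySem.Chars.strip (PySem.Chars.lower display_name.toList)) ['&'] (" and ".toList)
  match altTokens s with
  | [] => "survey"
  | w :: ts =>
    let name := PySem.Chars.join ['_'] (w :: ts)
    match name with
    | [] => ""  -- unreachable: every token is a nonempty run, so the join is nonempty (Python's name[0] cannot raise)
    | c :: _ => if decide ('0' ≤ c) && decide (c ≤ '9') then String.ofList ('s' :: '_' :: name) else String.ofList name

-- ===== PRECONDITION & SPEC =====
def Spec_to_pg_schema_name_py (display_name : String) (out : String) : Prop := out = to_pg_schema_name_py_alt display_name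
instance (display_name : String) (out : String) : Decidable (Spec_to_pg_schema_name_py display_name out) := by unfold Spec_to_pg_schema_name_py; infer_instance

-- ===== CLAIM (what is proved, stated in full; the proofs are below) =====
def Claim_equal_to_pg_schema_name_py : Prop := ∀ (display_name : String), Dom_to_pg_schema_name_py display_name → Spec_to_pg_schema_name_py display_name (to_pg_schema_name_py display_name)

-- ===== LEMMAS AND PROOFS =====

-- structural form of A's foldl loop (output chars streamed; the Bool is prev_us)
def pvGA : Bool → List Char → List Char
  | _, [] => []
  | prev, c :: t => if altOk c then c :: pvGA false t else if prev then pvGA true t else '_' :: pvGA true t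

-- the one trailing '_' A's loop emits after the last run when junk follows it
def pvTrail (t : List Char) : List Char :=
  if t.any altOk && !altOk ((t.getLast?).getD 'a') then ['_'] else []

theorem altTokens_nil : altTokens [] = [] := by simp [altTokens]

theorem altTokens_cons_pos {c : Char} {r : List Char} (h : altOk c = true) :
    altTokens (c :: r) = (c :: r.takeWhile altOk) :: altTokens (r.dropWhile altOk) := by
  simp only [altTokens, h, if_true]

theorem altTokens_cons_neg {c : Char} {r : List Char} (h : altOk c = false) :
    altTokens (c :: r) = altTokens r := by
  simp only [altTokens, h]
  simp

theorem pvOk_ne_us (c : Char) (h : altOk c = true) : c ≠ '_' := by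
  intro he
  rw [he] at h
  exact absurd h (by decide)

theorem pvStep_pos (acc : List Char) (prev : Bool) (c : Char) (h : altOk c = true) :
    (if (decide ('a' ≤ c) && decide (c ≤ 'z')) || (decide ('0' ≤ c) && decide (c ≤ '9')) then
        ((acc, prev).1 ++ [c], false)
      else if !(acc, prev).2 then ((acc, prev).1 ++ ['_'], true) else (acc, prev)) = (acc ++ [c], false) := by
  have e : ((decide ('a' ≤ c) && decide (c ≤ 'z')) || (decide ('0' ≤ c) && decide (c ≤ '9'))) = true := h
  simp only [e]
  simp

theorem pvStep_neg_f (acc : List Char) (c : Char) (h : altOk c = false) :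
    (if (decide ('a' ≤ c) && decide (c ≤ 'z')) || (decide ('0' ≤ c) && decide (c ≤ '9')) then
        ((acc, false).1 ++ [c], false)
      else if !(acc, false).2 then ((acc, false).1 ++ ['_'], true) else (acc, false)) = (acc ++ ['_'], true) := by
  have e : ((decide ('a' ≤ c) && decide (c ≤ 'z')) || (decide ('0' ≤ c) && decide (c ≤ '9'))) = false := h
  simp only [e]
  simp

theorem pvStep_neg_t (acc : List Char) (c : Char) (h : altOk c = false) :
    (if (decide ('a' ≤ c) && decide (c ≤ 'z')) || (decide ('0' ≤ c) && decide (c ≤ '9')) then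
        ((acc, true).1 ++ [c], false)
      else if !(acc, true).2 then ((acc, true).1 ++ ['_'], true) else (acc, true)) = (acc, true) := by
  have e : ((decide ('a' ≤ c) && decide (c ≤ 'z')) || (decide ('0' ≤ c) && decide (c ≤ '9'))) = false := h
  simp only [e]
  simp

theorem pvFoldA (t : List Char) (acc : List Char) (prev : Bool) :
    (t.foldl (fun (acc : List Char × Bool) ch =>
      if (decide ('a' ≤ ch) && decide (ch ≤ 'z')) || (decide ('0' ≤ ch) && decide (ch ≤ '9')) then
        (acc.1 ++ [ch], false)
      else if !acc.2 then (acc.1 ++ ['_'], true) else acc) (acc, prev)).1 = acc ++ pvGA prev t := by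
  induction t generalizing acc prev with
  | nil => simp [pvGA]
  | cons c t ih =>
    cases h : altOk c with
    | true =>
      rw [List.foldl_cons, pvStep_pos _ _ _ h, ih]
      simp [pvGA, h]
    | false =>
      cases prev with
      | false =>
        rw [List.foldl_cons, pvStep_neg_f _ _ h, ih]
        simp [pvGA, h]
      | true =>
        rw [List.foldl_cons, pvStep_neg_t _ _ h, ih]
        simp [pvGA, h]

theorem pvDropWhile_head_false {p : Char → Bool} {x : Char} {l : List Char} (h : p x = false) :
    List.dropWhile p (x :: l) = x :: l := by
  rw [List.dropWhile_cons, h]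
  simp

theorem altTokens_eq_nil_iff (t : List Char) : altTokens t = [] ↔ t.any altOk = false := by
  cases t with
  | nil => simp [altTokens_nil]
  | cons c r =>
    cases h : altOk c with
    | true => simp [altTokens_cons_pos h, h]
    | false =>
      rw [altTokens_cons_neg h]
      have := altTokens_eq_nil_iff r
      simp [h, this]
termination_by t.length

theorem altTokens_words (t : List Char) : ∀ w ∈ altTokens t, w ≠ [] ∧ ∀ c ∈ w, altOk c = true := by
  cases t with
  | nil => simp [altTokens_nil]
  | cons c r =>
    cases h : altOk c with
    | false =>
      rw [altTokens_cons_neg h]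
      exact altTokens_words r
    | true =>
      rw [altTokens_cons_pos h]
      intro w hw
      rcases List.mem_cons.mp hw with rfl | hw'
      · refine ⟨by simp, ?_⟩
        intro x hx
        rcases List.mem_cons.mp hx with rfl | hx'
        · exact h
        · exact List.mem_takeWhile_imp hx'
      · exact altTokens_words (r.dropWhile altOk) w hw'
termination_by t.length
decreasing_by
  · simp
  · simp only [List.length_cons]
    have := List.length_dropWhile_le altOk r
    omega

theorem pvGA_false_split (r : List Char) :
    pvGA false r = r.takeWhile altOk ++
      (match r.dropWhile altOk with | [] => [] | _ :: u => '_' :: pvGA true u) := by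
  induction r with
  | nil => simp [pvGA]
  | cons c r' ih =>
    cases h : altOk c with
    | true => simp [pvGA, h, ih]
    | false => simp [pvGA, h]

theorem pvGA_false_split_nil {r : List Char} (h : r.dropWhile altOk = []) :
    pvGA false r = r.takeWhile altOk := by
  rw [pvGA_false_split r, h]
  simp

theorem pvGA_false_split_cons {r : List Char} {d : Char} {u : List Char}
    (h : r.dropWhile altOk = d :: u) :
    pvGA false r = r.takeWhile altOk ++ '_' :: pvGA true u := by
  rw [pvGA_false_split r, h]

theorem pvGetLast?_suffix {l₁ l₂ : List Char} (h : l₂ <:+ l₁) (hne : l₂ ≠ []) :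
    l₁.getLast? = l₂.getLast? := by
  obtain ⟨w, rfl⟩ := h
  rw [List.getLast?_append]
  cases l₂ with
  | nil => exact absurd rfl hne
  | cons x xs =>
    cases hg : (x :: xs).getLast? with
    | none => simp [List.getLast?_eq_none_iff] at hg
    | some b => simp

theorem pvGA_true (t : List Char) :
    pvGA true t = PySem.Chars.join ['_'] (altTokens t) ++ pvTrail t := by
  cases t with
  | nil => simp [pvGA, altTokens_nil, pvTrail, PySem.Chars.join_nil]
  | cons c r =>
    cases h : altOk c with
    | false =>
      have hga : pvGA true (c :: r) = pvGA true r := by simp [pvGA, h]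
      rw [hga, pvGA_true r, altTokens_cons_neg h]
      congr 1
      cases r with
      | nil => simp [pvTrail, h]
      | cons x r' => simp [pvTrail, h, List.getLast?_cons_cons]
    | true =>
      have hga : pvGA true (c :: r) = c :: pvGA false r := by simp [pvGA, h]
      rw [hga]
      cases hdu : List.dropWhile altOk r with
      | nil =>
        have hall : ∀ x ∈ r, altOk x = true := List.dropWhile_eq_nil_iff.mp hdu
        have htr : pvTrail (c :: r) = [] := by
          have hlast : altOk (((c :: r).getLast?).getD 'a') = true := by
            cases r with
            | nil => simpa using h
            | cons x r' =>
              rw [List.getLast?_cons_cons]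
              cases hg : (x :: r').getLast? with
              | none => simp [List.getLast?_eq_none_iff] at hg
              | some b => simpa [hg] using hall b (List.mem_of_getLast? hg)
          simp [pvTrail, hlast]
        rw [pvGA_false_split_nil hdu, altTokens_cons_pos h, hdu, altTokens_nil, htr]
        simp [PySem.Chars.join_singleton]
      | cons d u =>
        have hd : altOk d = false := by
          have := List.head?_dropWhile_not altOk r
          rw [hdu] at this
          simpa using this
        have hsuf : (d :: u) <:+ (c :: r) := by
          have h1 : (d :: u) <:+ r := hdu ▸ List.dropWhile_suffix altOk
          exact h1.trans (List.suffix_cons c r)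
        have hlastcr : (c :: r).getLast? = (d :: u).getLast? := pvGetLast?_suffix hsuf (by simp)
        have ihu : pvGA true u = PySem.Chars.join ['_'] (altTokens u) ++ pvTrail u := pvGA_true u
        rw [pvGA_false_split_cons hdu, altTokens_cons_pos h, hdu, altTokens_cons_neg hd]
        cases hWu : altTokens u with
        | nil =>
          have hanyu : u.any altOk = false := (altTokens_eq_nil_iff u).mp hWu
          have hgau : pvGA true u = [] := by
            rw [ihu, hWu]
            simp [PySem.Chars.join_nil, pvTrail, hanyu]
          have htr : pvTrail (c :: r) = ['_'] := by
            have hlast : altOk (((c :: r).getLast?).getD 'a') = false := by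
              rw [hlastcr]
              cases u with
              | nil => simpa using hd
              | cons y u' =>
                rw [List.getLast?_cons_cons]
                cases hg : (y :: u').getLast? with
                | none => simp [List.getLast?_eq_none_iff] at hg
                | some b =>
                  have hb : b ∈ y :: u' := List.mem_of_getLast? hg
                  have hbf : altOk b = false := by
                    rw [List.any_eq_false] at hanyu
                    simpa using hanyu b hb
                  simp [hbf]
            simp [pvTrail, hlast, h]
          rw [hgau, htr, PySem.Chars.join_singleton]
          simp
        | cons w ws =>
          have hanyu : u.any altOk = true := by
            cases hau : u.any altOk with
            | true => rfl
            | false =>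
              rw [(altTokens_eq_nil_iff u).mpr hau] at hWu
              cases hWu
          have hune : u ≠ [] := by
            rintro rfl
            simp at hanyu
          have htr : pvTrail (c :: r) = pvTrail u := by
            have hl2 : (c :: r).getLast? = u.getLast? := by
              rw [hlastcr]
              cases u with
              | nil => exact absurd rfl hune
              | cons y u' => rw [List.getLast?_cons_cons]
            simp [pvTrail, hl2, h, hanyu, List.any_cons]
          rw [PySem.Chars.join_cons_cons, htr, ihu]
          simp [hWu]
termination_by t.length
decreasing_by
  all_goals simp only [List.length_cons]
  · omega
  · have := List.length_dropWhile_le altOk r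
    rw [hdu] at this
    simp only [List.length_cons] at this
    omega

theorem pvJoin_ne_nil (ws : List (List Char)) (hne : ws ≠ [])
    (hw : ∀ w ∈ ws, w ≠ [] ∧ ∀ c ∈ w, altOk c = true) :
    PySem.Chars.join ['_'] ws ≠ [] := by
  cases ws with
  | nil => exact absurd rfl hne
  | cons w rest =>
    obtain ⟨hwne, _⟩ := hw w (by simp)
    cases rest with
    | nil => simpa [PySem.Chars.join_singleton] using hwne
    | cons v rest' =>
      rw [PySem.Chars.join_cons_cons]
      intro hcon
      have := congrArg List.length hcon
      simp at this

theorem pvJoin_head (ws : List (List Char)) (hne : ws ≠ [])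
    (hw : ∀ w ∈ ws, w ≠ [] ∧ ∀ c ∈ w, altOk c = true) :
    ∀ c, (PySem.Chars.join ['_'] ws).head? = some c → altOk c = true := by
  cases ws with
  | nil => exact absurd rfl hne
  | cons w rest =>
    obtain ⟨hwne, hwok⟩ := hw w (by simp)
    cases w with
    | nil => exact absurd rfl hwne
    | cons a w' =>
      intro c hc
      have hh : (PySem.Chars.join ['_'] ((a :: w') :: rest)).head? = some a := by
        cases rest with
        | nil => simp [PySem.Chars.join_singleton]
        | cons v rest' =>
          rw [PySem.Chars.join_cons_cons]
          simp
      rw [hh] at hc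
      have hac : a = c := by injection hc
      subst hac
      exact hwok _ (by simp)

theorem pvJoin_last (ws : List (List Char)) (hne : ws ≠ [])
    (hw : ∀ w ∈ ws, w ≠ [] ∧ ∀ c ∈ w, altOk c = true) :
    ∀ c, (PySem.Chars.join ['_'] ws).getLast? = some c → altOk c = true := by
  induction ws with
  | nil => exact absurd rfl hne
  | cons w rest ih =>
    cases rest with
    | nil =>
      intro c hc
      rw [PySem.Chars.join_singleton] at hc
      exact (hw w (by simp)).2 c (List.mem_of_getLast? hc)
    | cons v rest' =>
      intro c hc
      have hw' : ∀ x ∈ v :: rest', x ≠ [] ∧ ∀ d ∈ x, altOk d = true := fun x hx => hw x (by simp [hx])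
      have hjne : PySem.Chars.join ['_'] (v :: rest') ≠ [] := pvJoin_ne_nil _ (by simp) hw'
      rw [PySem.Chars.join_cons_cons, List.append_assoc, List.getLast?_append] at hc
      have h2 : (['_'] ++ PySem.Chars.join ['_'] (v :: rest')).getLast?
          = (PySem.Chars.join ['_'] (v :: rest')).getLast? := by
        rw [List.getLast?_append]
        cases hg : (PySem.Chars.join ['_'] (v :: rest')).getLast? with
        | none => exact absurd (List.getLast?_eq_none_iff.mp hg) hjne
        | some b => simp
      rw [h2] at hc
      cases hg : (PySem.Chars.join ['_'] (v :: rest')).getLast? with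
      | none => exact absurd (List.getLast?_eq_none_iff.mp hg) hjne
      | some b =>
        rw [hg] at hc
        have hbc : b = c := by simpa using hc
        subst hbc
        exact ih (by simp) hw' _ hg

theorem pvTrail_mem (t : List Char) : ∀ c ∈ pvTrail t, c = '_' := by
  intro c hc
  unfold pvTrail at hc
  split at hc <;> simp_all

theorem pvJoinW_head (t : List Char) :
    ∀ c, (PySem.Chars.join ['_'] (altTokens t)).head? = some c → c ≠ '_' := by
  intro c hc
  cases hW : altTokens t with
  | nil =>
    rw [hW] at hc
    simp [PySem.Chars.join_nil] at hc
  | cons w ws =>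
    rw [hW] at hc
    exact pvOk_ne_us c (pvJoin_head (w :: ws) (by simp)
      (fun x hx => altTokens_words t x (by rw [hW]; exact hx)) c hc)

theorem pvJoinW_last (t : List Char) :
    ∀ c, (PySem.Chars.join ['_'] (altTokens t)).getLast? = some c → c ≠ '_' := by
  intro c hc
  cases hW : altTokens t with
  | nil =>
    rw [hW] at hc
    simp [PySem.Chars.join_nil] at hc
  | cons w ws =>
    rw [hW] at hc
    exact pvOk_ne_us c (pvJoin_last (w :: ws) (by simp)
      (fun x hx => altTokens_words t x (by rw [hW]; exact hx)) c hc)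

theorem pvStrip_sandwich (l m r : List Char)
    (hl : ∀ c ∈ l, c = '_') (hr : ∀ c ∈ r, c = '_')
    (hm1 : ∀ c, m.head? = some c → c ≠ '_') (hm2 : ∀ c, m.getLast? = some c → c ≠ '_') :
    PySem.Chars.stripChars (l ++ m ++ r) ['_'] = m := by
  have hdl : List.dropWhile (fun c => List.contains ['_'] c) l = [] :=
    List.dropWhile_eq_nil_iff.mpr (fun x hx => by rw [hl x hx]; decide)
  have hdr : List.dropWhile (fun c => List.contains ['_'] c) r.reverse = [] :=
    List.dropWhile_eq_nil_iff.mpr (fun x hx => by rw [hr x (List.mem_reverse.mp hx)]; decide)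
  cases m with
  | nil =>
    have hall : List.dropWhile (fun c => List.contains ['_'] c) (l ++ [] ++ r) = [] :=
      List.dropWhile_eq_nil_iff.mpr (by
        intro x hx
        simp only [List.append_nil, List.mem_append] at hx
        rcases hx with hx | hx
        · rw [hl x hx]; decide
        · rw [hr x hx]; decide)
    simp only [PySem.Chars.stripChars, hall]
    rfl
  | cons a m' =>
    have ha : (List.contains ['_'] a) = false := by simpa using hm1 a rfl
    have h1 : List.dropWhile (fun c => List.contains ['_'] c) (l ++ (a :: m') ++ r)
        = a :: (m' ++ r) := by
      rw [List.append_assoc, List.dropWhile_append, hdl, List.cons_append,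
        pvDropWhile_head_false ha]
      simp
    obtain ⟨b, hb⟩ : ∃ b, (a :: m').getLast? = some b := by
      cases hg : (a :: m').getLast? with
      | none => simp [List.getLast?_eq_none_iff] at hg
      | some b => exact ⟨b, rfl⟩
    have hbne : b ≠ '_' := hm2 b hb
    have pb : (List.contains ['_'] b) = false := by simpa using hbne
    cases hrev : (a :: m').reverse with
    | nil => simp at hrev
    | cons b' rest =>
      have hb' : b' = b := by
        have hhr := List.head?_reverse (l := a :: m')
        rw [hrev, hb] at hhr
        simpa using hhr
      subst hb'
      simp only [PySem.Chars.stripChars]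
      rw [h1]
      rw [show (a :: (m' ++ r)).reverse = r.reverse ++ (a :: m').reverse from by simp]
      rw [List.dropWhile_append, hdr, hrev, pvDropWhile_head_false pb]
      simp [← hrev]

theorem pvNamesEq (t : List Char) :
    PySem.Chars.stripChars (pvGA false t) ['_'] = PySem.Chars.join ['_'] (altTokens t) := by
  cases t with
  | nil => simp [pvGA, altTokens_nil, PySem.Chars.join_nil, PySem.Chars.stripChars]
  | cons c r =>
    cases h : altOk c with
    | true =>
      have hga : pvGA false (c :: r) = pvGA true (c :: r) := by simp [pvGA, h]
      rw [hga, pvGA_true (c :: r)]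
      have hs := pvStrip_sandwich [] (PySem.Chars.join ['_'] (altTokens (c :: r))) (pvTrail (c :: r))
        (by simp) (pvTrail_mem _) (pvJoinW_head _) (pvJoinW_last _)
      simpa using hs
    | false =>
      have hga : pvGA false (c :: r) = '_' :: pvGA true r := by simp [pvGA, h]
      rw [hga, pvGA_true r, ← altTokens_cons_neg h]
      have hs := pvStrip_sandwich ['_'] (PySem.Chars.join ['_'] (altTokens (c :: r))) (pvTrail r)
        (by simp) (pvTrail_mem _) (pvJoinW_head _) (pvJoinW_last _)
      rw [altTokens_cons_neg h] at hs ⊢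
      simpa using hs

theorem pvIsspaceFalse (c : Char) (h1 : 33 ≤ c.toNat) (h2 : c.toNat ≤ 126) :
    PySem.Chars.isspace c = false := by
  unfold PySem.Chars.isspace
  simp only [Bool.or_eq_false_iff, Bool.and_eq_false_iff, decide_eq_false_iff_not]
  omega

theorem pvToNatOfNat (n : Nat) (h : n < 55296) : (Char.ofNat n).toNat = n := by
  have hv : n.isValidChar := Or.inl h
  simp [Char.ofNat, hv, Char.ofNatAux, Char.toNat]

theorem pvIsspaceLower (c : Char) :
    PySem.Chars.isspace (PySem.Chars.lowerChar c) = PySem.Chars.isspace c := by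
  unfold PySem.Chars.lowerChar
  split_ifs with h
  · have hb1 : 'A' ≤ c ∧ c ≤ 'Z' := by
      simpa [PySem.Chars.isupper, Bool.and_eq_true, decide_eq_true_eq] using h
    have hb : 65 ≤ c.toNat ∧ c.toNat ≤ 90 :=
      ⟨by simpa [Char.le_def, UInt32.le_iff_toNat_le] using hb1.1,
       by simpa [Char.le_def, UInt32.le_iff_toNat_le] using hb1.2⟩
    have hofn : (Char.ofNat (c.toNat + 32)).toNat = c.toNat + 32 :=
      pvToNatOfNat _ (by omega)
    rw [pvIsspaceFalse _ (by rw [hofn]; omega) (by rw [hofn]; omega),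
      pvIsspaceFalse c (by omega) (by omega)]
  · rfl

theorem pvStripLower (L : List Char) :
    PySem.Chars.strip (PySem.Chars.lower L) = PySem.Chars.lower (PySem.Chars.strip L) := by
  have hp : (PySem.Chars.isspace ∘ PySem.Chars.lowerChar) = PySem.Chars.isspace :=
    funext pvIsspaceLower
  unfold PySem.Chars.strip PySem.Chars.rstrip PySem.Chars.lstrip PySem.Chars.lower
  simp [List.dropWhile_map, hp, ← List.map_reverse]

-- ===== VERDICT (by name: the statement is the Claim_ definition above) =====
theorem to_pg_schema_name_py_spec : Claim_equal_to_pg_schema_name_py := by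
  intro display_name _
  unfold Spec_to_pg_schema_name_py
  simp only [to_pg_schema_name_py, to_pg_schema_name_py_alt, pvStripLower]
  rw [pvFoldA _ [] false, List.nil_append, pvNamesEq]
  cases hW : altTokens (PySem.Chars.replace (PySem.Chars.lower (PySem.Chars.strip display_name.toList)) ['&'] (" and ".toList)) with
  | nil => simp [PySem.Chars.join_nil]
  | cons w ts =>
    have hwords : ∀ x ∈ w :: ts, x ≠ [] ∧ ∀ c ∈ x, altOk c = true := by
      intro x hx
      exact altTokens_words _ x (by rw [hW]; exact hx)
    have hjne : PySem.Chars.join ['_'] (w :: ts) ≠ [] := pvJoin_ne_nil _ (by simp) hwords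
    cases hj : PySem.Chars.join ['_'] (w :: ts) with
    | nil => exact absurd hj hjne
    | cons c rest =>
      simp [hj, PySem.Chars.isdigit]
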